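-- pv_equiv track=rewrite | github.com/jk-jung/problem-solving | codewars/6kyu/6_Memesorting.py | memesorting
-- ===== SOURCE A (Python) =====
-- def memesorting(s):
--     a = ['bug', 'boom', 'edits']
--     b = ['Roma', 'Maxim', 'Danik']
--     r = 'Vlad'
--     w= 1 << 30
--     for x, z in zip(a, b):
--         o = 0
--         ok = True
--         t = []
--         for y in x:
--             i = s.lower().find(y, o)
--             if i == -1:
--                 ok = False
--                 break
--             o = i + 1
--             t.append(i)
--
--         if ok and t[-1] < w:
--             w = t[-1]
--             r = z
--     return r
-- ===== SOURCE B (Python) =====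
-- def memesorting(s):
--     # One merged pass over s.lower() advancing a pointer per pattern,
--     # instead of three separate multi-find scans.
--     pats = ('bug', 'boom', 'edits')
--     names = ('Roma', 'Maxim', 'Danik')
--     ptr = [0, 0, 0]
--     done = [0, 0, 0]
--     for i, c in enumerate(s.lower()):
--         for k in range(3):
--             if ptr[k] < len(pats[k]) and pats[k][ptr[k]] == c:
--                 ptr[k] += 1
--                 if ptr[k] == len(pats[k]):
--                     done[k] = i
--     best = 1 << 30
--     r = 'Vlad'
--     for k in range(3):
--         if ptr[k] == len(pats[k]) and done[k] < best:
--             best = done[k]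
--             r = names[k]
--     return r
-- ===== Notes on version B (the rewrite author's own statement) =====
-- stated objective: alternative
-- what changed: B replaces A's three independent greedy find-with-offset scans (each call re-lowering s) with a single merged pass over s.lower() that advances one pointer per pattern and records each pattern's completion index, then picks the name with the smallest completion index.
import Mathlib
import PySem

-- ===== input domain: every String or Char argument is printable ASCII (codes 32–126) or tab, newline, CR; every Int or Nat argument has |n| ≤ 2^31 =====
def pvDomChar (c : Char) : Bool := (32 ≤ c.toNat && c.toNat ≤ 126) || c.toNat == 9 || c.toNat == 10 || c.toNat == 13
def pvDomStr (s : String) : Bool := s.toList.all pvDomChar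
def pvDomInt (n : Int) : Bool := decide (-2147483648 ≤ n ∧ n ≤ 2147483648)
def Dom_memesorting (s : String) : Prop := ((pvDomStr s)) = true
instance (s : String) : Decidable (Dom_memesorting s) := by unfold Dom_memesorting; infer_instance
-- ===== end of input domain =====

-- B does one merged pass over s.lower() with a pointer per pattern instead of A's
-- three separate greedy find-with-offset scans; same result, a different traversal.

-- ===== PORT A =====
-- inner loop of A over the characters y of pattern x: offset o, last found index
-- (t[-1]); returns none when some find fails ('ok = False'), some lastIndex otherwise.
def pvScanA (cs : List Char) : List Char → Int → Option Int → Option Int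
  | [], _, last => last
  | y :: rest, o, _ =>
    let i := PySem.Chars.findFrom cs [y] o
    if i = -1 then none else pvScanA cs rest (i + 1) (some i)

-- body of A's outer loop: state (w, r), one (pattern, name) pair
def pvPickA (cs : List Char) (wr : Int × String) (xz : List Char × String) : Int × String :=
  match pvScanA cs xz.1 0 none with
  | none => wr
  | some i => if i < wr.1 then (i, xz.2) else wr

def memesorting (s : String) : String :=
  let cs := PySem.Chars.lower s.toList   -- s.lower() (A recomputes it; same value each time)
  ([(['b','u','g'], "Roma"), (['b','o','o','m'], "Maxim"), (['e','d','i','t','s'], "Danik")].foldl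
      (pvPickA cs) ((1 : Int) <<< 30, "Vlad")).2

-- ===== PORT B =====
-- body of B's inner 'for k in range(3)' for one pattern: state (ptr, done)
def pvStep (pat : List Char) (st : Nat × Int) (ic : Int × Char) : Nat × Int :=
  if st.1 < pat.length && pat.getD st.1 ' ' == ic.2 then
    (st.1 + 1, if st.1 + 1 == pat.length then ic.1 else st.2)
  else st

-- body of B's selection loop: state (best, r)
def pvPickB (wr : Int × String) (e : (Nat × Int) × List Char × String) : Int × String :=
  if e.1.1 == e.2.1.length && e.1.2 < wr.1 then (e.1.2, e.2.2) else wr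

def memesorting_alt (s : String) : String :=
  let cs := PySem.Chars.lower s.toList
  let fin := (PySem.List.enumerate cs).foldl
    (fun st ic => (pvStep ['b','u','g'] st.1 ic, pvStep ['b','o','o','m'] st.2.1 ic,
                   pvStep ['e','d','i','t','s'] st.2.2 ic))
    ((0, 0), (0, 0), (0, 0))
  ([(fin.1, ['b','u','g'], "Roma"), (fin.2.1, ['b','o','o','m'], "Maxim"),
    (fin.2.2, ['e','d','i','t','s'], "Danik")].foldl pvPickB ((1 : Int) <<< 30, "Vlad")).2

-- ===== PRECONDITION & SPEC =====
def Spec_memesorting (s : String) (out : String) : Prop := out = memesorting_alt s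
instance (s : String) (out : String) : Decidable (Spec_memesorting s out) := by unfold Spec_memesorting; infer_instance

-- ===== CLAIM (what is proved, stated in full; the proofs are below) =====
def Claim_equal_memesorting : Prop := ∀ (s : String), Dom_memesorting s → Spec_memesorting s (memesorting s)

-- ===== LEMMAS AND PROOFS =====

-- B's per-pattern scan, written structurally with an explicit running index
def pvSeek (pat : List Char) : List Char → Int → Nat × Int → Nat × Int
  | [], _, st => st
  | c :: cs', i, st => pvSeek pat cs' (i + 1) (pvStep pat st (i, c))

theorem foldl_enumerate_eq_seek (pat : List Char) :
    ∀ (cs : List Char) (i : Int) (st : Nat × Int),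
      (PySem.List.enumerate cs i).foldl (pvStep pat) st = pvSeek pat cs i st := by
  intro cs
  induction cs with
  | nil => intro i st; simp [PySem.List.enumerate, pvSeek]
  | cons c cs' ih =>
      intro i st
      rw [PySem.List.enumerate_cons]
      simp only [List.foldl_cons, pvSeek]
      exact ih (i + 1) _

theorem foldl_triple {α β γ δ : Type} (f1 : α → δ → α) (f2 : β → δ → β) (f3 : γ → δ → γ) :
    ∀ (l : List δ) (a : α) (b : β) (c : γ),
      l.foldl (fun st ic => (f1 st.1 ic, f2 st.2.1 ic, f3 st.2.2 ic)) (a, b, c) =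
        (l.foldl f1 a, l.foldl f2 b, l.foldl f3 c) := by
  intro l
  induction l with
  | nil => intro a b c; rfl
  | cons x xs ih => intro a b c; simp only [List.foldl_cons]; exact ih _ _ _

theorem seek_stuck_full (pat : List Char) :
    ∀ (cs : List Char) (i d : Int), pvSeek pat cs i (pat.length, d) = (pat.length, d) := by
  intro cs
  induction cs with
  | nil => intro i d; rfl
  | cons c cs' ih => intro i d; simp [pvSeek, pvStep]; exact ih _ _

theorem getD_append_cons (pre rest : List Char) (y x : Char) :
    (pre ++ y :: rest).getD pre.length x = y := by
  induction pre with
  | nil => rfl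
  | cons p ps ih => simp only [List.cons_append, List.length_cons, List.getD_cons_succ]; exact ih

-- seek skips characters until the first occurrence of the next needed character
theorem seek_step (pat : List Char) (ptr : Nat) (hlt : ptr < pat.length) (y : Char)
    (hy : pat.getD ptr ' ' = y) :
    ∀ (cs : List Char) (i d : Int),
      pvSeek pat cs i (ptr, d) =
        match cs.idxOf? y with
        | none => (ptr, d)
        | some j => pvSeek pat (cs.drop (j + 1)) (i + j + 1)
            (ptr + 1, if ptr + 1 == pat.length then i + j else d) := by
  intro cs
  induction cs with
  | nil => intro i d; simp [List.idxOf?, pvSeek]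
  | cons c cs' ih =>
      intro i d
      by_cases hc : c = y
      · subst hc
        have hbeq : (pat.getD ptr ' ' == c) = true := by rw [hy]; simp
        have hidx : (c :: cs').idxOf? c = some 0 := by simp [List.idxOf?_cons]
        rw [hidx]
        simp only [pvSeek, pvStep, hlt, hbeq, decide_true, Bool.and_self, if_true]
        simp [List.drop_succ_cons]
      · have hbeq : (pat.getD ptr ' ' == c) = false := by
          rw [hy]; exact beq_eq_false_iff_ne.mpr (fun h => hc h.symm)
        have hidx : (c :: cs').idxOf? y = (cs'.idxOf? y).map (· + 1) := by
          simp [List.idxOf?_cons, beq_eq_false_iff_ne.mpr hc]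
        rw [hidx]
        have hstep : pvStep pat (ptr, d) (i, c) = (ptr, d) := by
          simp only [pvStep]
          rw [hbeq]
          simp
        simp only [pvSeek, hstep]
        rw [ih (i + 1) d]
        cases h : cs'.idxOf? y with
        | none => simp
        | some j =>
            simp only [Option.map_some]
            have h1 : i + 1 + (j : Int) + 1 = i + ((j + 1 : Nat) : Int) + 1 := by push_cast; ring
            have h2 : i + 1 + (j : Int) = i + ((j + 1 : Nat) : Int) := by push_cast; ring
            rw [h1, h2, List.drop_succ_cons]

-- find on a single-character needle is idxOf?
theorem find_singleton (cs : List Char) (y : Char) :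
    PySem.Chars.find cs [y] =
      match cs.idxOf? y with | none => -1 | some j => (j : Int) := by
  cases h : cs.idxOf? y with
  | none =>
      have hnm : y ∉ cs := List.idxOf?_eq_none_iff.mp h
      have : ¬ [y] <:+: cs := by
        intro hin
        exact hnm (hin.subset (List.mem_singleton_self y))
      simp [(PySem.Chars.find_eq_neg_one_iff cs [y]).mpr this]
  | some j =>
      obtain ⟨hj, hget, hmin⟩ := List.idxOf?_eq_some_iff.mp h
      have hinf : [y] <:+: cs := by
        have hmem : y ∈ cs := by
          have := List.getElem_mem hj
          rwa [hget] at this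
        obtain ⟨p, q, rfl⟩ := List.append_of_mem hmem
        exact ⟨p, q, by simp⟩
      have hne : PySem.Chars.find cs [y] ≠ -1 :=
        (PySem.Chars.find_ne_neg_one_iff cs [y]).mpr hinf
      have hge : (0 : Int) ≤ PySem.Chars.find cs [y] := by
        have := PySem.Chars.neg_one_le_find (s := cs) (sub := [y])
        omega
      obtain ⟨hpre, hmin'⟩ := PySem.Chars.find_spec hge
      set t := (PySem.Chars.find cs [y]).toNat with ht
      have hpre_iff : ∀ i : Nat, [y] <+: cs.drop i ↔ cs[i]? = some y := by
        intro i
        rw [← List.head?_drop]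
        constructor
        · rintro ⟨tl, htl⟩; rw [← htl]; rfl
        · intro hh
          cases hd : cs.drop i with
          | nil => rw [hd] at hh; simp at hh
          | cons a tl =>
              rw [hd] at hh; simp at hh
              exact ⟨tl, by simp [hh]⟩
      have htj : t = j := by
        by_contra hne'
        rcases Nat.lt_or_ge t j with hlt | hge'
        · have hg := (hpre_iff t).mp hpre
          have htlen : t < cs.length := by omega
          rw [List.getElem?_eq_getElem htlen] at hg
          exact hmin t hlt (by simpa using hg)
        · have hjt : j < t := by omega
          exact (hmin' j hjt) ((hpre_iff j).mpr (by
            rw [List.getElem?_eq_getElem hj, hget]))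
      have hfin : PySem.Chars.find cs [y] = (t : Int) := by omega
      rw [hfin, htj]

theorem findFrom_singleton (cs : List Char) (y : Char) (k : Nat) (hk : k ≤ cs.length) :
    PySem.Chars.findFrom cs [y] (k : Int) =
      match (cs.drop k).idxOf? y with | none => -1 | some j => ((k + j : Nat) : Int) := by
  rw [PySem.Chars.findFrom_natCast cs [y] k hk, find_singleton]
  cases h : (cs.drop k).idxOf? y with
  | none => simp
  | some j => simp

-- last-value argument of pvScanA is irrelevant for a nonempty remaining pattern
theorem pvScanA_last_irrel (cs : List Char) (y : Char) (rest : List Char) (o : Int)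
    (l l' : Option Int) : pvScanA cs (y :: rest) o l = pvScanA cs (y :: rest) o l' := by
  simp [pvScanA]

-- main correspondence: A's find-based scan of the remaining pattern vs B's pointer walk
theorem scan_seek (cs : List Char) :
    ∀ (rest pre : List Char) (k : Nat), k ≤ cs.length → rest ≠ [] → ∀ (d : Int),
      (∀ i, pvScanA cs rest (k : Int) none = some i →
        pvSeek (pre ++ rest) (cs.drop k) (k : Int) (pre.length, d) =
          (pre.length + rest.length, i)) ∧
      (pvScanA cs rest (k : Int) none = none →
        (pvSeek (pre ++ rest) (cs.drop k) (k : Int) (pre.length, d)).1 <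
          pre.length + rest.length) := by
  intro rest
  induction rest with
  | nil => intro pre k hk hne d; exact absurd rfl hne
  | cons y rest' ih =>
      intro pre k hk _ d
      have hlt : pre.length < (pre ++ y :: rest').length := by simp
      have hy : (pre ++ y :: rest').getD pre.length ' ' = y := getD_append_cons _ _ _ _
      have hseek := seek_step (pre ++ y :: rest') pre.length hlt y hy (cs.drop k) (k : Int) d
      cases hidx : (cs.drop k).idxOf? y with
      | none =>
          have hfind : PySem.Chars.findFrom cs [y] (k : Int) = -1 := by
            rw [findFrom_singleton cs y k hk, hidx]
          have hscan : pvScanA cs (y :: rest') (k : Int) none = none := by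
            simp [pvScanA, hfind]
          simp only [hidx] at hseek
          constructor
          · intro i hi; rw [hscan] at hi; exact absurd hi (by simp)
          · intro _; rw [hseek]; simp
      | some j =>
          obtain ⟨hj, -, -⟩ := List.idxOf?_eq_some_iff.mp hidx
          have hjlen : j < cs.length - k := by simpa [List.length_drop] using hj
          have hk' : k + j + 1 ≤ cs.length := by omega
          have hfind : PySem.Chars.findFrom cs [y] (k : Int) = ((k + j : Nat) : Int) := by
            rw [findFrom_singleton cs y k hk, hidx]
          have hfne : ((k + j : Nat) : Int) ≠ -1 := by omega
          have hscan : pvScanA cs (y :: rest') (k : Int) none =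
              pvScanA cs rest' (((k + j : Nat) : Int) + 1) (some ((k + j : Nat) : Int)) := by
            simp only [pvScanA, hfind, if_neg hfne]
          simp only [hidx] at hseek
          have hdrop : (cs.drop k).drop (j + 1) = cs.drop (k + j + 1) := by
            rw [List.drop_drop]; ring_nf
          have hidxcast : (k : Int) + (j : Int) + 1 = ((k + j + 1 : Nat) : Int) := by
            push_cast; ring
          have hkj : (k : Int) + (j : Int) = ((k + j : Nat) : Int) := by push_cast; ring
          rw [hdrop, hidxcast, hkj] at hseek
          have hassoc : pre ++ y :: rest' = (pre ++ [y]) ++ rest' := by simp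
          cases hrest' : rest' with
          | nil =>
              subst hrest'
              have hptr : (pre.length + 1 == (pre ++ y :: List.nil).length) = true := by simp
              constructor
              · intro i hi
                rw [hscan] at hi
                simp only [pvScanA, Option.some.injEq] at hi
                rw [hseek]
                simp only [hptr, if_true]
                have hfull := seek_stuck_full (pre ++ [y]) (cs.drop (k + j + 1))
                  ((k + j + 1 : Nat) : Int) ((k + j : Nat) : Int)
                have hlen1 : (pre ++ [y]).length = pre.length + 1 := by simp
                rw [← hlen1, hfull, ← hi]
                all_goals simp
              · intro hnone
                rw [hscan] at hnone
                exact absurd hnone (by simp [pvScanA])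
          | cons y2 r2 =>
              subst hrest'
              have hscan2 : pvScanA cs (y2 :: r2) (((k + j : Nat) : Int) + 1)
                  (some ((k + j : Nat) : Int)) =
                  pvScanA cs (y2 :: r2) ((k + j + 1 : Nat) : Int) none := by
                rw [pvScanA_last_irrel cs y2 r2 _ _ none]
                congr 1
              set d' := (if (pre.length + 1 == (pre ++ y :: y2 :: r2).length) = true
                then ((k + j : Nat) : Int) else d) with hd'
              have hih := ih (pre ++ [y]) (k + j + 1) hk' (by simp) d'
              have hlen1 : (pre ++ [y]).length = pre.length + 1 := by simp
              rw [hassoc] at hseek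
              rw [← hlen1] at hseek
              constructor
              · intro i hi
                rw [hscan, hscan2] at hi
                rw [hassoc, hseek, hih.1 i hi]
                all_goals (simp; try omega)
              · intro hnone
                rw [hscan, hscan2] at hnone
                rw [hassoc, hseek]
                calc (pvSeek ((pre ++ [y]) ++ y2 :: r2) (cs.drop (k + j + 1))
                      ((k + j + 1 : Nat) : Int) ((pre ++ [y]).length, d')).1
                    < (pre ++ [y]).length + (y2 :: r2).length := hih.2 hnone
                  _ = pre.length + (y :: y2 :: r2).length := by simp; omega

-- per-pattern consequence at the top level (pre = [], k = 0)
theorem scan_seek_top (cs pat : List Char) (hne : pat ≠ []) (d : Int) :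
    (∀ i, pvScanA cs pat 0 none = some i →
      pvSeek pat cs 0 (0, d) = (pat.length, i)) ∧
    (pvScanA cs pat 0 none = none → (pvSeek pat cs 0 (0, d)).1 < pat.length) := by
  have h := scan_seek cs pat [] 0 (Nat.zero_le _) hne d
  simpa using h

-- ===== VERDICT (by name: the statement is the Claim_ definition above) =====
theorem memesorting_spec : Claim_equal_memesorting := by
  unfold Claim_equal_memesorting
  intro s _
  unfold Spec_memesorting memesorting memesorting_alt
  set cs := PySem.Chars.lower s.toList with hcs
  simp only
  rw [foldl_triple, foldl_enumerate_eq_seek, foldl_enumerate_eq_seek, foldl_enumerate_eq_seek]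
  obtain ⟨h1s, h1n⟩ := scan_seek_top cs ['b','u','g'] (by simp) 0
  obtain ⟨h2s, h2n⟩ := scan_seek_top cs ['b','o','o','m'] (by simp) 0
  obtain ⟨h3s, h3n⟩ := scan_seek_top cs ['e','d','i','t','s'] (by simp) 0
  cases e1 : pvScanA cs ['b','u','g'] 0 none with
  | none =>
      have n1 : (pvSeek ['b','u','g'] cs 0 (0, 0)).1 ≠ 3 := by simpa using Nat.ne_of_lt (h1n e1)
      cases e2 : pvScanA cs ['b','o','o','m'] 0 none with
      | none =>
          have n2 : (pvSeek ['b','o','o','m'] cs 0 (0, 0)).1 ≠ 4 := by simpa using Nat.ne_of_lt (h2n e2)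
          cases e3 : pvScanA cs ['e','d','i','t','s'] 0 none with
          | none =>
              have n3 : (pvSeek ['e','d','i','t','s'] cs 0 (0, 0)).1 ≠ 5 := by simpa using Nat.ne_of_lt (h3n e3)
              simp [pvPickA, pvPickB, e1, e2, e3, n1, n2, n3]
          | some i3 =>
              rw [h3s i3 e3]
              simp [pvPickA, pvPickB, e1, e2, e3, n1, n2]
      | some i2 =>
          rw [h2s i2 e2]
          cases e3 : pvScanA cs ['e','d','i','t','s'] 0 none with
          | none =>
              have n3 : (pvSeek ['e','d','i','t','s'] cs 0 (0, 0)).1 ≠ 5 := by simpa using Nat.ne_of_lt (h3n e3)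
              simp [pvPickA, pvPickB, e1, e2, e3, n1, n3]
          | some i3 =>
              rw [h3s i3 e3]
              simp [pvPickA, pvPickB, e1, e2, e3, n1]
  | some i1 =>
      rw [h1s i1 e1]
      cases e2 : pvScanA cs ['b','o','o','m'] 0 none with
      | none =>
          have n2 : (pvSeek ['b','o','o','m'] cs 0 (0, 0)).1 ≠ 4 := by simpa using Nat.ne_of_lt (h2n e2)
          cases e3 : pvScanA cs ['e','d','i','t','s'] 0 none with
          | none =>
              have n3 : (pvSeek ['e','d','i','t','s'] cs 0 (0, 0)).1 ≠ 5 := by simpa using Nat.ne_of_lt (h3n e3)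
              simp [pvPickA, pvPickB, e1, e2, e3, n2, n3]
          | some i3 =>
              rw [h3s i3 e3]
              simp [pvPickA, pvPickB, e1, e2, e3, n2]
      | some i2 =>
          rw [h2s i2 e2]
          cases e3 : pvScanA cs ['e','d','i','t','s'] 0 none with
          | none =>
              have n3 : (pvSeek ['e','d','i','t','s'] cs 0 (0, 0)).1 ≠ 5 := by simpa using Nat.ne_of_lt (h3n e3)
              simp [pvPickA, pvPickB, e1, e2, e3, n3]
          | some i3 =>
              rw [h3s i3 e3]
              simp [pvPickA, pvPickB, e1, e2, e3]
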